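-- pv_equiv track=rewrite | github.com/ratisbonrobotics/transformer | tokenizer.py | decode_with_byte_fallback_utf8
-- ===== SOURCE A (Python) =====
-- def decode_with_byte_fallback_utf8(token_lists, vocabulary):
--     inverted_vocabulary = {v: k for k, v in vocabulary.items()}
--     decoded_dialogs = []
--     for token_list in token_lists:
--         decoded_dialog = []
--         byte_sequence = []
--         for token in token_list:
--             if token in inverted_vocabulary:
--                 if byte_sequence:
--                     decoded_bytes = ' '.join(chr(b) for b in byte_sequence)
--                     decoded_dialog.append(decoded_bytes)
--                     byte_sequence = []
--                 decoded_dialog.append(inverted_vocabulary[token])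
--             else:
--                 byte_sequence.append(token)
--         if byte_sequence:
--             decoded_bytes = ' '.join(chr(b) for b in byte_sequence)
--             decoded_dialog.append(decoded_bytes)
--         decoded_dialogs.append(' '.join(decoded_dialog))
--     return decoded_dialogs
-- ===== SOURCE B (Python) =====
-- def decode_with_byte_fallback_utf8(token_lists, vocabulary):
--     inverted_vocabulary = {v: k for k, v in vocabulary.items()}
--     return [' '.join(inverted_vocabulary[t] if t in inverted_vocabulary else chr(t)
--                      for t in token_list)
--             for token_list in token_lists]
-- ===== Notes on version B (the rewrite author's own statement) =====
-- stated objective: simpler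
-- what changed: B eliminates A's byte_sequence accumulator state machine and its two flush sites entirely: because a space-joined byte run is itself space-joined into the dialog, each token can be mapped independently to inverted_vocabulary[t] or chr(t) and the whole dialog joined once, so each result is a single flat map-and-join comprehension.
import Mathlib
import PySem

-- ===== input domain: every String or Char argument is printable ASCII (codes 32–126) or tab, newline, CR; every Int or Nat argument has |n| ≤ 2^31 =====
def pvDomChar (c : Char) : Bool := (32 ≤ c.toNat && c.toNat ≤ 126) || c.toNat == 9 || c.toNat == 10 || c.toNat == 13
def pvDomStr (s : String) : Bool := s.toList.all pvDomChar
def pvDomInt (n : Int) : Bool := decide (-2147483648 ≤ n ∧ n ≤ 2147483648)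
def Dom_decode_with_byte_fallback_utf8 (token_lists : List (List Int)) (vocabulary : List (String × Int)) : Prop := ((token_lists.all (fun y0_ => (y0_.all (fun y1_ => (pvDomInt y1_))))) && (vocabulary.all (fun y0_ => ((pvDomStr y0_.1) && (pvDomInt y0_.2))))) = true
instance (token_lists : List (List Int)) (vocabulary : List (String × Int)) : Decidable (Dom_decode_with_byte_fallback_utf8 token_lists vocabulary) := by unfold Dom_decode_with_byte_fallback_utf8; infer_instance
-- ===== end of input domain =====

-- B drops A's byte_sequence accumulator and both flush branches: each dialog is one flat
-- map (vocab word or chr) joined once by ' '; same cost, simpler code.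

-- chr(t) for a valid Unicode scalar value t (Pre_ guarantees this; exact there)
def pvChr (t : Int) : String := String.ofList [Char.ofNat t.toNat]

-- ===== PORT A =====
-- the duplicated flush code of A ("if byte_sequence: decoded_dialog.append(' '.join(chr(b) for b in byte_sequence))")
def pvFlushA (st : List String × List Int) : List String :=
  if st.2.isEmpty then st.1 else st.1 ++ [PySem.Str.join " " (st.2.map pvChr)]

-- A's inner loop body; state = (decoded_dialog, byte_sequence)
def pvStepA (inv : PySem.Dict Int String) (st : List String × List Int) (token : Int) :
    List String × List Int :=
  if inv.contains token then (pvFlushA st ++ [inv.getD token ""], [])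
  else (st.1, st.2 ++ [token])

def decode_with_byte_fallback_utf8 (token_lists : List (List Int)) (vocabulary : List (String × Int)) : List String :=
  let inverted_vocabulary : PySem.Dict Int String :=
    vocabulary.foldl (fun d p => d.insert p.2 p.1) PySem.Dict.empty
  token_lists.foldl (fun decoded_dialogs token_list =>
    decoded_dialogs ++
      [PySem.Str.join " " (pvFlushA (token_list.foldl (pvStepA inverted_vocabulary) ([], [])))]) []

-- ===== PORT B =====
def decode_with_byte_fallback_utf8_alt (token_lists : List (List Int)) (vocabulary : List (String × Int)) : List String :=
  let inverted_vocabulary : PySem.Dict Int String :=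
    vocabulary.foldl (fun d p => d.insert p.2 p.1) PySem.Dict.empty
  token_lists.map (fun token_list =>
    PySem.Str.join " "
      (token_list.map (fun t =>
        if inverted_vocabulary.contains t then inverted_vocabulary.getD t "" else pvChr t)))

-- ===== PRECONDITION & SPEC =====
-- Pre_ excludes token lists with a fallback token (one not among vocabulary's values) outside
-- chr's range (A raises ValueError there) or equal to a surrogate code point 0xD800–0xDFFF,
-- where A returns a lone-surrogate str that is not representable as a Lean String (B returns
-- the same str there).
def Pre_decode_with_byte_fallback_utf8 (token_lists : List (List Int)) (vocabulary : List (String × Int)) : Prop :=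
  (token_lists.all (fun tl => tl.all (fun t =>
    decide (t ∈ vocabulary.map Prod.snd) ||
      (decide (0 ≤ t) && decide (t ≤ 1114111) && !(decide (55296 ≤ t) && decide (t ≤ 57343)))))) = true
instance (token_lists : List (List Int)) (vocabulary : List (String × Int)) : Decidable (Pre_decode_with_byte_fallback_utf8 token_lists vocabulary) := by unfold Pre_decode_with_byte_fallback_utf8; infer_instance

def pvWitness_decode_with_byte_fallback_utf8 : List (List Int) × (List (String × Int)) :=
  ([[5, 97, 98, 5, 99], [104]], [("hi", 5), ("yo", 104)])

def Spec_decode_with_byte_fallback_utf8 (token_lists : List (List Int)) (vocabulary : List (String × Int)) (out : List String) : Prop := out = decode_with_byte_fallback_utf8_alt token_lists vocabulary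
instance (token_lists : List (List Int)) (vocabulary : List (String × Int)) (out : List String) : Decidable (Spec_decode_with_byte_fallback_utf8 token_lists vocabulary out) := by unfold Spec_decode_with_byte_fallback_utf8; infer_instance

-- ===== CLAIM (what is proved, stated in full; the proofs are below) =====
def Claim_equal_decode_with_byte_fallback_utf8 : Prop := ∀ (token_lists : List (List Int)) (vocabulary : List (String × Int)), Dom_decode_with_byte_fallback_utf8 token_lists vocabulary → Pre_decode_with_byte_fallback_utf8 token_lists vocabulary → Spec_decode_with_byte_fallback_utf8 token_lists vocabulary (decode_with_byte_fallback_utf8 token_lists vocabulary)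

-- ===== LEMMAS AND PROOFS =====

-- join over a non-empty tail, cons form
lemma join_cons_of_ne_nil (sep x : List Char) (w : List (List Char)) (h : w ≠ []) :
    PySem.Chars.join sep (x :: w) = x ++ sep ++ PySem.Chars.join sep w := by
  obtain ⟨b, r, rfl⟩ := List.exists_cons_of_ne_nil h
  exact PySem.Chars.join_cons_cons sep x b r

-- a head element that is itself "a ++ sep ++ c" splits into two elements
lemma join_head_split (sep a c : List Char) (zs : List (List Char)) :
    PySem.Chars.join sep ((a ++ sep ++ c) :: zs) = PySem.Chars.join sep (a :: c :: zs) := by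
  cases zs with
  | nil => simp [PySem.Chars.join_singleton, PySem.Chars.join_cons_cons]
  | cons z zs' =>
      rw [PySem.Chars.join_cons_cons, PySem.Chars.join_cons_cons, PySem.Chars.join_cons_cons]
      simp [List.append_assoc]

-- a pre-joined non-empty group at the head flattens
lemma join_head_merge (sep : List Char) (ys : List (List Char)) (hys : ys ≠ []) :
    ∀ zs, PySem.Chars.join sep (PySem.Chars.join sep ys :: zs) = PySem.Chars.join sep (ys ++ zs) := by
  induction ys with
  | nil => exact absurd rfl hys
  | cons y ys' ih =>
      intro zs
      cases ys' with
      | nil => simp [PySem.Chars.join_singleton]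
      | cons y' r =>
          simp only [List.cons_append]
          rw [PySem.Chars.join_cons_cons, join_head_split,
            join_cons_of_ne_nil sep y (PySem.Chars.join sep (y' :: r) :: zs) (by simp),
            ih (by simp) zs, PySem.Chars.join_cons_cons]
          simp [List.cons_append]

-- joining a pre-joined non-empty group is the same as joining the flattened list (char level)
lemma chars_join_merge (sep : List Char) (xs zs : List (List Char)) (ys : List (List Char))
    (hys : ys ≠ []) :
    PySem.Chars.join sep (xs ++ (PySem.Chars.join sep ys :: zs)) =
      PySem.Chars.join sep (xs ++ (ys ++ zs)) := by
  induction xs with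
  | nil => simpa using join_head_merge sep ys hys zs
  | cons x xs' ih =>
      simp only [List.cons_append]
      rw [join_cons_of_ne_nil sep x (xs' ++ (PySem.Chars.join sep ys :: zs)) (by simp),
        join_cons_of_ne_nil sep x (xs' ++ (ys ++ zs))
          (by intro h; rw [List.append_eq_nil_iff, List.append_eq_nil_iff] at h; exact hys h.2.1),
        ih]

-- the same fact lifted to Strings with separator " "
lemma str_join_merge (xs zs : List String) (ys : List String) (hys : ys ≠ []) :
    PySem.Str.join " " (xs ++ (PySem.Str.join " " ys :: zs)) =
      PySem.Str.join " " (xs ++ (ys ++ zs)) := by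
  apply String.toList_inj.mp
  simp only [pysem, List.map_append, List.map_cons]
  exact chars_join_merge " ".toList (xs.map String.toList) (zs.map String.toList)
    (ys.map String.toList) (by simpa using hys)

lemma str_join_singleton (s : String) : PySem.Str.join " " [s] = s := by
  simp [PySem.Str.join]

-- the per-dialog invariant of A's inner loop
lemma inner_loop (inv : PySem.Dict Int String) (tl : List Int) :
    ∀ (dd : List String) (bs : List Int),
      PySem.Str.join " " (pvFlushA (tl.foldl (pvStepA inv) (dd, bs))) =
        PySem.Str.join " "
          (pvFlushA (dd, bs) ++ tl.map (fun t => if inv.contains t then inv.getD t "" else pvChr t)) := by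
  induction tl with
  | nil => intro dd bs; simp
  | cons t rest ih =>
      intro dd bs
      simp only [List.foldl_cons, List.map_cons]
      by_cases hc : inv.contains t
      · rw [show pvStepA inv (dd, bs) t = (pvFlushA (dd, bs) ++ [inv.getD t ""], []) from by
          simp [pvStepA, hc], ih]
        simp [pvFlushA, hc]
      · rw [show pvStepA inv (dd, bs) t = (dd, bs ++ [t]) from by simp [pvStepA, hc], ih]
        simp only [hc, Bool.false_eq_true, ↓reduceIte]
        by_cases hbs : bs = []
        · subst hbs
          simp [pvFlushA, str_join_singleton]
        · have h1 : pvFlushA (dd, bs ++ [t]) = dd ++ [PySem.Str.join " " ((bs ++ [t]).map pvChr)] := by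
            simp [pvFlushA]
          have h2 : pvFlushA (dd, bs) = dd ++ [PySem.Str.join " " (bs.map pvChr)] := by
            simp [pvFlushA, hbs]
          rw [h1, h2, List.append_assoc, List.append_assoc,
            List.singleton_append, List.singleton_append,
            str_join_merge dd _ _ (by simp),
            str_join_merge dd _ _ (by simpa using hbs)]
          simp [List.map_append, List.append_assoc]

-- ===== VERDICT (by name: the statement is the Claim_ definition above) =====
theorem decode_with_byte_fallback_utf8_spec : Claim_equal_decode_with_byte_fallback_utf8 := by
  intro token_lists vocabulary _ _
  unfold Spec_decode_with_byte_fallback_utf8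
  unfold decode_with_byte_fallback_utf8 decode_with_byte_fallback_utf8_alt
  rw [PySem.List.foldl_append_singleton_eq_map]
  apply List.map_congr_left
  intro tl _
  rw [inner_loop _ tl [] []]
  simp [pvFlushA]
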